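-- pv_equiv track=rewrite | github.com/LucasOl1337/LojaSync | app/application/products/service.py | _remove_digits_from_start
-- ===== SOURCE A (Python) =====
-- def _remove_digits_from_start(text: str, amount: int) -> str:
--     if amount <= 0:
--         return text
--     result: list[str] = []
--     removed = 0
--     for char in text:
--         if char.isdigit() and removed < amount:
--             removed += 1
--             continue
--         result.append(char)
--     return "".join(result)
-- ===== SOURCE B (Python) =====
-- def _remove_digits_from_start(text: str, amount: int) -> str:
--     if amount <= 0:
--         return text
--     # staged: locate all digit positions, find the cut point after the
--     # amount-th digit, strip every digit from the prefix, keep the suffix verbatim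
--     positions = [i for i, c in enumerate(text) if c.isdigit()]
--     if len(positions) <= amount:
--         return "".join(c for c in text if not c.isdigit())
--     cut = positions[amount]
--     return "".join(c for c in text[:cut] if not c.isdigit()) + text[cut:]
-- ===== Notes on version B (the rewrite author's own statement) =====
-- stated objective: alternative
-- what changed: Instead of A's single counting scan with an accumulator, B first computes the list of digit positions via enumerate, uses the amount-th position as a cut point, strips all digits from the prefix before the cut with a filter, and appends the suffix verbatim.
import Mathlib
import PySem

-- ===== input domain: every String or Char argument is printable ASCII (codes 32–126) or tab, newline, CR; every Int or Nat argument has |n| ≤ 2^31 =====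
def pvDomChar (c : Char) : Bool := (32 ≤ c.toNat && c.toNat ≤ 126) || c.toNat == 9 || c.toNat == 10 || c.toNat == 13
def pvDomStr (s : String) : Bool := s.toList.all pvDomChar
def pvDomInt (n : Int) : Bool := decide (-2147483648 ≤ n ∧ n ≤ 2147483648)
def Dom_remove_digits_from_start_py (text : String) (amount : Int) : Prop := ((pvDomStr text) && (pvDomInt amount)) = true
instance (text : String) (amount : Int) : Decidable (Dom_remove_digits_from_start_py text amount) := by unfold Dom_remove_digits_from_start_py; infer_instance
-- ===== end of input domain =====

-- B replaces A's single counting pass by a staged computation: list the digit positions,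
-- pick the cut point after the amount-th digit, strip all digits from the prefix and keep
-- the suffix verbatim; return values are proved equal.

-- ===== PORT A =====
-- literal port of A: fold over the characters carrying (result, removed)
def remove_digits_from_start_py (text : String) (amount : Int) : String :=
  if amount ≤ 0 then text
  else
    let st := text.toList.foldl
      (fun (st : List Char × Int) c =>
        if PySem.Chars.isdigit c ∧ st.2 < amount then (st.1, st.2 + 1)
        else (st.1 ++ [c], st.2))
      ([], 0)
    String.mk st.1

-- ===== PORT B =====
-- port of the comprehension '[i for i, c in enumerate(text) if c.isdigit()]'
-- as an indexed recursion (running index = enumerate's counter)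
def pvDigitPositions : Nat → List Char → List Nat
  | _, [] => []
  | i, c :: cs =>
      if PySem.Chars.isdigit c then i :: pvDigitPositions (i + 1) cs
      else pvDigitPositions (i + 1) cs

def remove_digits_from_start_py_alt (text : String) (amount : Int) : String :=
  if amount ≤ 0 then text
  else
    let cs := text.toList
    let ps := pvDigitPositions 0 cs
    if (ps.length : Int) ≤ amount then
      String.mk (cs.filter (fun c => !PySem.Chars.isdigit c))
    else
      let cut := ps.getD amount.toNat 0
      String.mk ((cs.take cut).filter (fun c => !PySem.Chars.isdigit c) ++ cs.drop cut)

-- ===== PRECONDITION & SPEC =====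
def Spec_remove_digits_from_start_py (text : String) (amount : Int) (out : String) : Prop := out = remove_digits_from_start_py_alt text amount
instance (text : String) (amount : Int) (out : String) : Decidable (Spec_remove_digits_from_start_py text amount out) := by unfold Spec_remove_digits_from_start_py; infer_instance

-- ===== CLAIM =====
def Claim_equal_remove_digits_from_start_py : Prop := ∀ (text : String) (amount : Int), Dom_remove_digits_from_start_py text amount → Spec_remove_digits_from_start_py text amount (remove_digits_from_start_py text amount)

-- ===== LEMMAS AND PROOFS =====

-- mid-level form of A's loop: drop the first n digits, keep everything else
def pvReSubDigits : Nat → List Char → List Char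
  | 0, rest => rest
  | _ + 1, [] => []
  | n + 1, c :: rest =>
      if PySem.Chars.isdigit c then pvReSubDigits n rest
      else c :: pvReSubDigits (n + 1) rest

-- A's fold from state (acc, r) produces acc ++ (the remainder with budget amount − r)
lemma foldA_eq_reSub (amount : Int) (cs : List Char) :
    ∀ (acc : List Char) (r : Int), 0 ≤ r →
    (cs.foldl
      (fun (st : List Char × Int) c =>
        if PySem.Chars.isdigit c ∧ st.2 < amount then (st.1, st.2 + 1)
        else (st.1 ++ [c], st.2))
      (acc, r)).1 = acc ++ pvReSubDigits (amount - r).toNat cs := by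
  induction cs with
  | nil => intro acc r _; rcases h : (amount - r).toNat with _ | n <;> simp [pvReSubDigits]
  | cons c cs ih =>
    intro acc r hr
    simp only [List.foldl_cons]
    by_cases hd : PySem.Chars.isdigit c = true
    · by_cases hlt : r < amount
      · have h1 : (amount - r).toNat = (amount - (r + 1)).toNat + 1 := by omega
        rw [if_pos ⟨hd, hlt⟩, ih acc (r + 1) (by omega), h1]
        simp [pvReSubDigits, hd]
      · have h0 : (amount - r).toNat = 0 := by omega
        rw [if_neg (by simp [hlt]), ih (acc ++ [c]) r hr, h0]
        simp [pvReSubDigits]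
    · rw [if_neg (by simp [hd]), ih (acc ++ [c]) r hr]
      rcases h : (amount - r).toNat with _ | n
      · simp [pvReSubDigits]
      · simp [pvReSubDigits, hd]

-- every listed position is ≥ the starting index
lemma digitPositions_ge (cs : List Char) :
    ∀ (j : Nat), ∀ x ∈ pvDigitPositions j cs, j ≤ x := by
  induction cs with
  | nil => intro j x hx; simp [pvDigitPositions] at hx
  | cons c cs ih =>
    intro j x hx
    by_cases hd : PySem.Chars.isdigit c = true
    · simp [pvDigitPositions, hd] at hx
      rcases hx with rfl | hx
      · exact le_rfl
      · exact Nat.le_of_succ_le (ih (j + 1) x hx)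
    · simp [pvDigitPositions, hd] at hx
      exact Nat.le_of_succ_le (ih (j + 1) x hx)

lemma digitPositions_getD_ge (cs : List Char) (j n : Nat)
    (h : n < (pvDigitPositions j cs).length) :
    j ≤ (pvDigitPositions j cs).getD n 0 := by
  rw [List.getD_eq_getElem _ _ h]
  exact digitPositions_ge cs j _ (List.getElem_mem h)

-- no digits before the first listed position
lemma digitPositions_prefix_nodigit (cs : List Char) :
    ∀ (j p : Nat) (rest : List Nat), pvDigitPositions j cs = p :: rest →
    ∀ c ∈ cs.take (p - j), PySem.Chars.isdigit c = false := by
  induction cs with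
  | nil => intro j p rest h; simp [pvDigitPositions] at h
  | cons c cs ih =>
    intro j p rest h x hx
    by_cases hd : PySem.Chars.isdigit c = true
    · simp [pvDigitPositions, hd] at h
      rcases h with ⟨rfl, _⟩
      simp at hx
    · simp [pvDigitPositions, hd] at h
      have hp : j + 1 ≤ p := digitPositions_ge cs (j + 1) p (h ▸ List.mem_cons_self)
      have hpj : p - j = (p - (j + 1)) + 1 := by omega
      rw [hpj] at hx
      simp [List.take_succ_cons] at hx
      rcases hx with rfl | hx
      · simpa using hd
      · exact ih (j + 1) p rest h x hx

-- empty position list means no digits at all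
lemma digitPositions_nil_nodigit (cs : List Char) :
    ∀ (j : Nat), pvDigitPositions j cs = [] →
    ∀ c ∈ cs, PySem.Chars.isdigit c = false := by
  induction cs with
  | nil => intro j _ c hc; simp at hc
  | cons c cs ih =>
    intro j h x hx
    by_cases hd : PySem.Chars.isdigit c = true
    · simp [pvDigitPositions, hd] at h
    · simp [pvDigitPositions, hd] at h
      rcases List.mem_cons.mp hx with rfl | hx
      · simpa using hd
      · exact ih (j + 1) h x hx

-- the staged B expression at budget n, relative to starting index j
def pvStagedB (n j : Nat) (cs : List Char) : List Char :=
  let ps := pvDigitPositions j cs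
  if ps.length ≤ n then cs.filter (fun c => !PySem.Chars.isdigit c)
  else
    let cut := ps.getD n 0
    (cs.take (cut - j)).filter (fun c => !PySem.Chars.isdigit c) ++ cs.drop (cut - j)

lemma stagedB_zero (cs : List Char) (j : Nat) : pvStagedB 0 j cs = cs := by
  unfold pvStagedB
  rcases h : pvDigitPositions j cs with _ | ⟨p, rest⟩
  · rw [if_pos (by simp)]
    exact List.filter_eq_self.mpr (fun c hc => by
      simpa using digitPositions_nil_nodigit cs j h c hc)
  · rw [if_neg (by simp)]
    simp only [List.getD_cons_zero]
    rw [List.filter_eq_self.mpr (fun c hc => by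
      simpa using digitPositions_prefix_nodigit cs j p rest h c hc)]
    exact List.take_append_drop _ _

lemma reSub_eq_stagedB (cs : List Char) :
    ∀ (n j : Nat), pvReSubDigits n cs = pvStagedB n j cs := by
  induction cs with
  | nil =>
    intro n j
    rcases n with _ | n <;> simp [pvReSubDigits, pvStagedB, pvDigitPositions]
  | cons c cs ih =>
    intro n j
    rcases n with _ | n
    · rw [stagedB_zero]; rfl
    by_cases hd : PySem.Chars.isdigit c = true
    · -- digit head: budget decreases, position list gains j at the front
      have hps : pvDigitPositions j (c :: cs) = j :: pvDigitPositions (j + 1) cs := by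
        simp [pvDigitPositions, hd]
      have hsub : pvReSubDigits (n + 1) (c :: cs) = pvReSubDigits n cs := by
        simp [pvReSubDigits, hd]
      rw [hsub, ih n (j + 1)]
      unfold pvStagedB
      simp only [hps, List.length_cons, Nat.add_le_add_iff_right, List.getD_cons_succ]
      by_cases hlen : (pvDigitPositions (j + 1) cs).length ≤ n
      · simp only [hlen, if_pos]
        simp [hd]
      · simp only [hlen, if_neg, not_false_iff]
        have hcut := digitPositions_getD_ge cs (j + 1) n (by omega)
        set p := (pvDigitPositions (j + 1) cs).getD n 0 with hp
        have h1 : p - j = (p - (j + 1)) + 1 := by omega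
        rw [h1]
        simp [List.take_succ_cons, List.drop_succ_cons, hd]
    · -- non-digit head: kept, budget unchanged, index advances
      have hps : pvDigitPositions j (c :: cs) = pvDigitPositions (j + 1) cs := by
        simp [pvDigitPositions, hd]
      have hsub : pvReSubDigits (n + 1) (c :: cs) = c :: pvReSubDigits (n + 1) cs := by
        simp [pvReSubDigits, hd]
      rw [hsub, ih (n + 1) (j + 1)]
      unfold pvStagedB
      simp only [hps]
      by_cases hlen : (pvDigitPositions (j + 1) cs).length ≤ n + 1
      · simp only [hlen, if_pos]
        simp [hd]
      · simp only [hlen, if_neg, not_false_iff]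
        have hcut := digitPositions_getD_ge cs (j + 1) (n + 1) (by omega)
        set p := (pvDigitPositions (j + 1) cs).getD (n + 1) 0 with hp
        have h1 : p - j = (p - (j + 1)) + 1 := by omega
        rw [h1]
        simp [List.take_succ_cons, List.drop_succ_cons, hd]

-- ===== VERDICT =====
theorem remove_digits_from_start_py_spec : Claim_equal_remove_digits_from_start_py := by
  intro text amount _
  unfold Spec_remove_digits_from_start_py remove_digits_from_start_py remove_digits_from_start_py_alt
  by_cases h : amount ≤ 0
  · simp [h]
  · simp only [if_neg h]
    rw [foldA_eq_reSub amount text.toList [] 0 le_rfl]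
    simp only [Int.sub_zero, List.nil_append]
    rw [reSub_eq_stagedB text.toList amount.toNat 0]
    unfold pvStagedB
    by_cases hl : (pvDigitPositions 0 text.toList).length ≤ amount.toNat
    · rw [if_pos hl, if_pos (by omega)]
    · rw [if_neg hl, if_neg (by omega)]
      simp
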